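-- pv_equiv track=rewrite | github.com/ivankrister/py | ocr_processor.py | _calculate_confidence_boost
-- ===== SOURCE A (Python) =====
-- def _calculate_confidence_boost(text: str, receipt_type: str) -> float:
--     """
--     Calculate confidence boost based on expected patterns for each receipt type.
--
--     Args:
--         text: Extracted text
--         receipt_type: Detected receipt type
--
--     Returns:
--         Confidence boost value
--     """
--     boost = 0
--     text_lower = text.lower()
--
--     # Base boost for monetary patterns
--     if '10.00' in text:
--         boost += 50  # High boost for exact expected amount
--     elif any(pattern in text for pattern in ['$', '₱', '.00', 'php']):
--         boost += 20  # Medium boost for monetary indicators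
--
--     if receipt_type == 'maya':
--         # Maya-specific boosts
--         if '+639772478589' in text:
--             boost += 80  # Perfect phone number match
--         elif '639772478589' in text:
--             boost += 60  # Phone without +
--
--         if 'eb8c' in text_lower and 'c67b' in text_lower:
--             boost += 70  # Reference ID pattern match
--         elif 'reference' in text_lower and ('eb8' in text_lower or 'c67b' in text_lower):
--             boost += 40  # Partial reference match
--
--         if 'received money from' in text_lower:
--             boost += 30  # Maya signature phrase
--         elif 'maya' in text_lower:
--             boost += 20  # Maya keyword
--
--     elif receipt_type == 'gcash':
--         # GCash-specific boosts
--         if '+639296681405' in text or ',+639296681405' in text: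
--             boost += 80  # Perfect phone number match
--         elif '639296681405' in text:
--             boost += 60  # Phone without +
--
--         if '9032469742237' in text:
--             boost += 70  # Perfect reference ID match
--         elif any(ref in text for ref in ['903246974', '469742237']):
--             boost += 40  # Partial reference match
--
--         if 'express send' in text_lower or 'expresssend' in text_lower:
--             boost += 40  # GCash signature phrase
--         elif 'gcash' in text_lower:
--             boost += 30  # GCash keyword
--
--     return boost
-- ===== SOURCE B (Python) =====
-- # Data-driven scoring table: shared monetary group plus per-type groups; each
-- # group awards the boost of its first matching rule (must-AND / any-OR patterns).
--
-- _MONEY_GROUP = [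
--     ([], ['10.00'], False, 50),
--     ([], ['$', '\u20b1', '.00', 'php'], False, 20),
-- ]
--
-- _TYPE_GROUPS = {
--     'maya': [
--         [([], ['+639772478589'], False, 80),
--          ([], ['639772478589'], False, 60)],
--         [(['eb8c', 'c67b'], [], True, 70),
--          (['reference'], ['eb8', 'c67b'], True, 40)],
--         [([], ['received money from'], True, 30),
--          ([], ['maya'], True, 20)],
--     ],
--     'gcash': [
--         [([], ['+639296681405', ',+639296681405'], False, 80),
--          ([], ['639296681405'], False, 60)],
--         [([], ['9032469742237'], False, 70),
--          ([], ['903246974', '469742237'], False, 40)],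
--         [([], ['express send', 'expresssend'], True, 40),
--          ([], ['gcash'], True, 30)],
--     ],
-- }
--
--
-- def _rule_hit(rule, text, text_lower):
--     must, anyl, use_lower, _ = rule
--     t = text_lower if use_lower else text
--     return all(p in t for p in must) and (not anyl or any(p in t for p in anyl))
--
--
-- def _group_score(group, text, text_lower):
--     for rule in group:
--         if _rule_hit(rule, text, text_lower):
--             return rule[3]
--     return 0
--
--
-- def _calculate_confidence_boost(text: str, receipt_type: str) -> float:
--     text_lower = text.lower()
--     groups = [_MONEY_GROUP] + _TYPE_GROUPS.get(receipt_type, [])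
--     return sum(_group_score(g, text, text_lower) for g in groups)
-- ===== Notes on version B (the rewrite author's own statement) =====
-- stated objective: alternative
-- what changed: Replaces the nested if/elif branch cascade by a declarative scoring table (a shared monetary group plus per-type ordered groups of must-AND/any-OR pattern rules) evaluated by one uniform first-match loop and summed.
import Mathlib
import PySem

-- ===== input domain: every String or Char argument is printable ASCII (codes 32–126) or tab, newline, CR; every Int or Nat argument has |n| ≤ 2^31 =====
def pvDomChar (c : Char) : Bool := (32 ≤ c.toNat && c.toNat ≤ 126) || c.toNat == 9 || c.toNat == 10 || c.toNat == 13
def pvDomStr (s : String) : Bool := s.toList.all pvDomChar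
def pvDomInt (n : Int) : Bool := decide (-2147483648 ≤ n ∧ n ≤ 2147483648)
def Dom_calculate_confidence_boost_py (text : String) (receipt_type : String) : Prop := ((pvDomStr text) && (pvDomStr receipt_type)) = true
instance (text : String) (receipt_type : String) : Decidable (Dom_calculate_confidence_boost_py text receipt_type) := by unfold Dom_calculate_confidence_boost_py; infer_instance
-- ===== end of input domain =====

-- B replaces A's nested if/elif cascade with a declarative scoring table (groups of
-- must/any pattern rules) evaluated by one uniform first-match loop; alternative decomposition, same cost.


-- ===== PORT A =====
def calculate_confidence_boost_py (text : String) (receipt_type : String) : Int :=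
  let boost : Int := 0
  let text_lower := PySem.Str.lower text
  let boost :=
    if PySem.Str.isIn "10.00" text then boost + 50
    else if (["$", "₱", ".00", "php"].any (fun pattern => PySem.Str.isIn pattern text)) then boost + 20
    else boost
  if receipt_type == "maya" then
    let boost :=
      if PySem.Str.isIn "+639772478589" text then boost + 80
      else if PySem.Str.isIn "639772478589" text then boost + 60
      else boost
    let boost :=
      if PySem.Str.isIn "eb8c" text_lower && PySem.Str.isIn "c67b" text_lower then boost + 70
      else if PySem.Str.isIn "reference" text_lower && (PySem.Str.isIn "eb8" text_lower || PySem.Str.isIn "c67b" text_lower) then boost + 40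
      else boost
    let boost :=
      if PySem.Str.isIn "received money from" text_lower then boost + 30
      else if PySem.Str.isIn "maya" text_lower then boost + 20
      else boost
    boost
  else if receipt_type == "gcash" then
    let boost :=
      if PySem.Str.isIn "+639296681405" text || PySem.Str.isIn ",+639296681405" text then boost + 80
      else if PySem.Str.isIn "639296681405" text then boost + 60
      else boost
    let boost :=
      if PySem.Str.isIn "9032469742237" text then boost + 70
      else if (["903246974", "469742237"].any (fun ref => PySem.Str.isIn ref text)) then boost + 40
      else boost
    let boost :=
      if PySem.Str.isIn "express send" text_lower || PySem.Str.isIn "expresssend" text_lower then boost + 40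
      else if PySem.Str.isIn "gcash" text_lower then boost + 30
      else boost
    boost
  else boost

-- ===== PORT B =====
-- a rule: (must-contain-all patterns, any-of patterns, use lowercased text, boost)
abbrev pvRule : Type := List String × List String × Bool × Int

def pvMoneyGroup : List pvRule :=
  [([], ["10.00"], false, 50),
   ([], ["$", "₱", ".00", "php"], false, 20)]

def pvTypeGroups : PySem.Dict String (List (List pvRule)) :=
  PySem.Dict.mk [("maya",
     [[([], ["+639772478589"], false, 80),
       ([], ["639772478589"], false, 60)],
      [(["eb8c", "c67b"], [], true, 70),
       (["reference"], ["eb8", "c67b"], true, 40)],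
      [([], ["received money from"], true, 30),
       ([], ["maya"], true, 20)]]),
   ("gcash",
     [[([], ["+639296681405", ",+639296681405"], false, 80),
       ([], ["639296681405"], false, 60)],
      [([], ["9032469742237"], false, 70),
       ([], ["903246974", "469742237"], false, 40)],
      [([], ["express send", "expresssend"], true, 40),
       ([], ["gcash"], true, 30)]])]

def pvRuleHit (text text_lower : String) (r : pvRule) : Bool :=
  let t := if r.2.2.1 then text_lower else text
  (r.1.all (fun p => PySem.Str.isIn p t)) &&
    (r.2.1.isEmpty || r.2.1.any (fun p => PySem.Str.isIn p t))

def pvGroupScore (text text_lower : String) (g : List pvRule) : Int :=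
  match g.find? (pvRuleHit text text_lower) with
  | some r => r.2.2.2
  | none => 0

def calculate_confidence_boost_py_alt (text : String) (receipt_type : String) : Int :=
  let text_lower := PySem.Str.lower text
  let groups := pvMoneyGroup :: (PySem.Dict.getD pvTypeGroups receipt_type [])
  (groups.map (pvGroupScore text text_lower)).sum

-- ===== PRECONDITION & SPEC =====
def Spec_calculate_confidence_boost_py (text : String) (receipt_type : String) (out : Int) : Prop := out = calculate_confidence_boost_py_alt text receipt_type
instance (text : String) (receipt_type : String) (out : Int) : Decidable (Spec_calculate_confidence_boost_py text receipt_type out) := by unfold Spec_calculate_confidence_boost_py; infer_instance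

-- ===== CLAIM (what is proved, stated in full; the proofs are below) =====
def Claim_equal_calculate_confidence_boost_py : Prop := ∀ (text : String) (receipt_type : String), Dom_calculate_confidence_boost_py text receipt_type → Spec_calculate_confidence_boost_py text receipt_type (calculate_confidence_boost_py text receipt_type)

-- ===== LEMMAS AND PROOFS =====

-- evaluates a two-rule group's first-match score
theorem pvGroupScore_pair (t tl : String) (r1 r2 : pvRule) :
    pvGroupScore t tl [r1, r2] =
      if pvRuleHit t tl r1 then r1.2.2.2 else if pvRuleHit t tl r2 then r2.2.2.2 else 0 := by
  unfold pvGroupScore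
  cases h1 : pvRuleHit t tl r1 <;> cases h2 : pvRuleHit t tl r2 <;> simp [List.find?, h1, h2]

-- ===== VERDICT (by name: the statement is the Claim_ definition above) =====
set_option maxHeartbeats 1000000 in
theorem calculate_confidence_boost_py_spec : Claim_equal_calculate_confidence_boost_py := by
  intro text receipt_type _
  unfold Spec_calculate_confidence_boost_py
  by_cases hm : receipt_type = "maya"
  · subst hm
    have hget : PySem.Dict.getD pvTypeGroups "maya" [] =
        [[([], ["+639772478589"], false, 80), ([], ["639772478589"], false, 60)],
         [(["eb8c", "c67b"], [], true, 70), (["reference"], ["eb8", "c67b"], true, 40)],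
         [([], ["received money from"], true, 30), ([], ["maya"], true, 20)]] := rfl
    simp only [calculate_confidence_boost_py, calculate_confidence_boost_py_alt, hget,
      pvMoneyGroup, List.map_cons, List.map_nil, List.sum_cons, List.sum_nil, pvGroupScore_pair]
    simp only [pvRuleHit, List.all_cons, List.all_nil, List.any_cons, List.any_nil,
      List.isEmpty_nil, List.isEmpty_cons, Bool.or_false, Bool.false_or, Bool.and_true,
      Bool.true_and, beq_self_eq_true, if_true, Bool.false_eq_true, reduceIte]
    split_ifs <;> omega
  · by_cases hg : receipt_type = "gcash"
    · subst hg
      have hget : PySem.Dict.getD pvTypeGroups "gcash" [] =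
          [[([], ["+639296681405", ",+639296681405"], false, 80), ([], ["639296681405"], false, 60)],
           [([], ["9032469742237"], false, 70), ([], ["903246974", "469742237"], false, 40)],
           [([], ["express send", "expresssend"], true, 40), ([], ["gcash"], true, 30)]] := rfl
      simp only [calculate_confidence_boost_py, calculate_confidence_boost_py_alt, hget,
        pvMoneyGroup, List.map_cons, List.map_nil, List.sum_cons, List.sum_nil, pvGroupScore_pair,
        show (("gcash" : String) == "maya") = false from rfl]
      simp only [pvRuleHit, List.all_nil, List.any_cons, List.any_nil,
        List.isEmpty_nil, List.isEmpty_cons, Bool.or_false, Bool.false_or,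
        Bool.true_and, beq_self_eq_true, if_true, if_false, Bool.false_eq_true]
      split_ifs <;> omega
    · have hm' : ("maya" == receipt_type) = false := by
        simp only [beq_eq_false_iff_ne, ne_eq]; exact fun h => hm h.symm
      have hg' : ("gcash" == receipt_type) = false := by
        simp only [beq_eq_false_iff_ne, ne_eq]; exact fun h => hg h.symm
      have hmr : (receipt_type == "maya") = false := by
        simp only [beq_eq_false_iff_ne, ne_eq]; exact hm
      have hgr : (receipt_type == "gcash") = false := by
        simp only [beq_eq_false_iff_ne, ne_eq]; exact hg
      have hget : PySem.Dict.getD pvTypeGroups receipt_type [] = [] := by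
        simp [pvTypeGroups, PySem.Dict.getD, hm', hg', PySem.Dict.get?]
      simp only [calculate_confidence_boost_py, calculate_confidence_boost_py_alt, hget,
        pvMoneyGroup, List.map_cons, List.map_nil, List.sum_cons, List.sum_nil, pvGroupScore_pair,
        hmr, hgr, Bool.false_eq_true, if_false]
      simp only [pvRuleHit, List.all_cons, List.all_nil, List.any_cons, List.any_nil,
        List.isEmpty_nil, List.isEmpty_cons, Bool.or_false, Bool.false_or, Bool.and_true,
        Bool.true_and, Bool.false_eq_true, reduceIte]
      split_ifs <;> omega
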